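-- pv_equiv track=rewrite | github.com/pypi-data/pypi-mirror-308 | packages/onstreet-parking-study/onstreet_parking_study-1.2.2-py3-none-any.whl/lapin/configs/user_conf.py | parseDictString
-- ===== SOURCE A (Python) =====
-- def parseDictString(item):
--     start=item.find('{')
--     end=item.rfind('}')
--     content = item[start+1:end]
--
--     keys=[]
--     values=[]
--     part=''
--     openB=0 #accounting for internal dicts/lists/tuples
--     skipT=False #accounting for strings
--     for c in content:
--         if c in '{[(':
--             openB+=1
--         if c in ')]}':
--             openB-=1
--         if c in ['"',"'"] and not skipT:
--             skipT=True
--         if c not in ':,' or openB > 0 or skipT: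
--             part+=c
--         else:
--             if len(keys) == len(values):
--                 keys.append(part.strip())
--             else:
--                 values.append(part.strip())
--             part=''
--         if c in ['"',"'"] and skipT:
--             skipT=False
--
--     if part != '':
--         values.append(part.strip())
--
--     return keys, values
-- ===== SOURCE B (Python) =====
-- def _distribute(ts):
--     if not ts:
--         return [], []
--     if len(ts) == 1:
--         return [ts[0].strip()], []
--     keys, values = _distribute(ts[2:])
--     return [ts[0].strip()] + keys, [ts[1].strip()] + values
--
--
-- def parseDictString(item):
--     content = item[item.find('{') + 1:item.rfind('}')]
--     cuts = []
--     depth = 0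
--     for i, c in enumerate(content):
--         depth += (c in '{[(') - (c in ')]}')
--         if c in ':,' and depth <= 0:
--             cuts.append(i)
--     bounds = [-1] + cuts + [len(content)]
--     tokens = [content[a + 1:b] for a, b in zip(bounds, bounds[1:])]
--     keys, values = _distribute(tokens[:-1])
--     if tokens[-1] != '':
--         values.append(tokens[-1].strip())
--     return keys, values
-- ===== Notes on version B (the rewrite author's own statement) =====
-- stated objective: alternative
-- what changed: A's single stateful loop that grows a buffer string character by character and interleaves key/value appends (with a no-op quote flag) is replaced by: collect the index positions of top-level separators, cut the content into tokens by slicing between consecutive recorded positions, and distribute the tokens by a recursive helper that consumes a key/value pair per step; slicing avoids per-character string concatenation, a constant-factor win.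
import Mathlib
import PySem

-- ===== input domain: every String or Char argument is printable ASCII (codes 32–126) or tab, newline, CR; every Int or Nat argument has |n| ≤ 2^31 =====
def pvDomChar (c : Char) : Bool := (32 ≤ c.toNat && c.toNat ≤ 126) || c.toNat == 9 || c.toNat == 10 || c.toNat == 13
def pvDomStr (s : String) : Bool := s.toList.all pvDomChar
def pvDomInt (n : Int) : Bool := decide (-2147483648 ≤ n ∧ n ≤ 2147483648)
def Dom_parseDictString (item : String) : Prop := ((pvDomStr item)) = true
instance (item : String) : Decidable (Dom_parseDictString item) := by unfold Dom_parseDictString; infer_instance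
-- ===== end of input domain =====

-- B replaces A's single stateful loop (character accumulator 'part' with interleaved
-- key/value appends and a no-op quote flag) by collecting top-level separator positions,
-- slicing the content between consecutive positions into tokens, and distributing the
-- tokens with a recursive helper consuming a key/value pair per step: objective alternative.

-- ===== PORT A =====
-- one iteration of A's for-loop; state = ((keys, values), part, openB, skipT)
def pdsAStep (s : (List String × List String) × List Char × Int × Bool) (c : Char) :
    (List String × List String) × List Char × Int × Bool :=
  let kv := s.1
  let part := s.2.1
  let openB0 := s.2.2.1
  let skipT0 := s.2.2.2
  let openB1 := if c = '{' ∨ c = '[' ∨ c = '(' then openB0 + 1 else openB0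
  let openB := if c = ')' ∨ c = ']' ∨ c = '}' then openB1 - 1 else openB1
  let skipT : Bool := if (c = '"' ∨ c = '\'') ∧ skipT0 = false then true else skipT0
  let s' :=
    if ¬(c = ':' ∨ c = ',') ∨ openB > 0 ∨ skipT = true then
      (kv, part ++ [c], openB, skipT)
    else
      if kv.1.length = kv.2.length then
        ((kv.1 ++ [String.ofList (PySem.Chars.strip part)], kv.2), ([] : List Char), openB, skipT)
      else
        ((kv.1, kv.2 ++ [String.ofList (PySem.Chars.strip part)]), ([] : List Char), openB, skipT)
  let skipT' : Bool := if (c = '"' ∨ c = '\'') ∧ s'.2.2.2 = true then false else s'.2.2.2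
  (s'.1, s'.2.1, s'.2.2.1, skipT')

def parseDictString (item : String) : List String × List String :=
  let start := PySem.Str.find item "{"
  let stop := PySem.Str.rfind item "}"
  let content := PySem.List.slice item.toList (some (start + 1)) (some stop)
  let s := content.foldl pdsAStep (([], []), [], 0, false)
  if s.2.1 ≠ [] then (s.1.1, s.1.2 ++ [String.ofList (PySem.Chars.strip s.2.1)]) else s.1

-- ===== PORT B =====
-- Source B's cut-collecting loop body; state = (cuts, depth), input = (i, c) from enumerate
def pdsCutStep (s : List Int × Int) (ic : Int × Char) : List Int × Int :=
  let depth := s.2 + (if ic.2 = '{' ∨ ic.2 = '[' ∨ ic.2 = '(' then 1 else 0)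
                   - (if ic.2 = ')' ∨ ic.2 = ']' ∨ ic.2 = '}' then 1 else 0)
  if (ic.2 = ':' ∨ ic.2 = ',') ∧ depth ≤ 0 then (s.1 ++ [ic.1], depth) else (s.1, depth)

-- Source B's recursive _distribute: consume a key/value pair of tokens per step
def pdsDistribute2 : List (List Char) → List String × List String
  | [] => ([], [])
  | [t] => ([String.ofList (PySem.Chars.strip t)], [])
  | k :: v :: ts =>
      let r := pdsDistribute2 ts
      (String.ofList (PySem.Chars.strip k) :: r.1, String.ofList (PySem.Chars.strip v) :: r.2)

def parseDictString_alt (item : String) : List String × List String :=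
  let start := PySem.Str.find item "{"
  let stop := PySem.Str.rfind item "}"
  let content := PySem.List.slice item.toList (some (start + 1)) (some stop)
  let s := (PySem.List.enumerate content 0).foldl pdsCutStep ([], 0)
  let bounds : List Int := -1 :: (s.1 ++ [(content.length : Int)])
  let tokens := (bounds.zip bounds.tail).map
    (fun p => PySem.List.slice content (some (p.1 + 1)) (some p.2))
  let kv := pdsDistribute2 (PySem.List.slice tokens none (some (-1)))
  let last := PySem.List.pyGetD tokens (-1) []
  if last ≠ [] then (kv.1, kv.2 ++ [String.ofList (PySem.Chars.strip last)]) else kv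

-- ===== PRECONDITION & SPEC =====
def Spec_parseDictString (item : String) (out : List String × List String) : Prop := out = parseDictString_alt item
instance (item : String) (out : List String × List String) : Decidable (Spec_parseDictString item out) := by unfold Spec_parseDictString; infer_instance

-- ===== CLAIM (what is proved, stated in full; the proofs are below) =====
def Claim_equal_parseDictString : Prop := ∀ (item : String), Dom_parseDictString item → Spec_parseDictString item (parseDictString item)

-- ===== LEMMAS AND PROOFS =====

-- proof-side: list(enumerate(...)) of an extended list
theorem pds_enumerate_append_singleton {α : Type} (l : List α) (a : α) (s : Int) :
    PySem.List.enumerate (l ++ [a]) s = PySem.List.enumerate l s ++ [(s + l.length, a)] := by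
  induction l generalizing s with
  | nil => simp [PySem.List.enumerate_cons, PySem.List.enumerate_nil]
  | cons x xs ih =>
      simp [PySem.List.enumerate_cons, ih]
      ring_nf

-- proof-side tokenizer: one step of an accumulator tokenizer; state = (tokens, piece, depth)
def pdsBStep (s : List (List Char) × List Char × Int) (c : Char) :
    List (List Char) × List Char × Int :=
  let toks := s.1
  let piece := s.2.1
  let depth0 := s.2.2
  let depth :=
    if c = '{' ∨ c = '[' ∨ c = '(' then depth0 + 1
    else if c = ')' ∨ c = ']' ∨ c = '}' then depth0 - 1
    else depth0
  if (c = ':' ∨ c = ',') ∧ depth ≤ 0 then (toks ++ [piece], [], depth)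
  else (toks, piece ++ [c], depth)

-- proof-side: tokens obtained by slicing cs between consecutive cut positions
def pdsSegs (cs : List Char) (L : Int) : Int → List Int → List (List Char)
  | a, [] => [PySem.List.slice cs (some (a + 1)) (some L)]
  | a, b :: r => PySem.List.slice cs (some (a + 1)) (some b) :: pdsSegs cs L b r

theorem pdsDistribute2_append (ts : List (List Char)) (t : List Char) :
    pdsDistribute2 (ts ++ [t]) =
      if ts.length % 2 = 0 then
        ((pdsDistribute2 ts).1 ++ [String.ofList (PySem.Chars.strip t)], (pdsDistribute2 ts).2)
      else
        ((pdsDistribute2 ts).1, (pdsDistribute2 ts).2 ++ [String.ofList (PySem.Chars.strip t)]) := by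
  induction ts using pdsDistribute2.induct with
  | case1 => simp [pdsDistribute2]
  | case2 t' => simp [pdsDistribute2]
  | case3 k v ts ih =>
      have hlen : (k :: v :: ts).length % 2 = ts.length % 2 := by
        simp only [List.length_cons]; omega
      simp only [List.cons_append, pdsDistribute2, ih, hlen]
      split_ifs <;> simp

theorem pdsDistribute2_lengths (ts : List (List Char)) :
    (pdsDistribute2 ts).1.length = (ts.length + 1) / 2 ∧
    (pdsDistribute2 ts).2.length = ts.length / 2 := by
  induction ts using pdsDistribute2.induct with
  | case1 => simp [pdsDistribute2]
  | case2 t' => simp [pdsDistribute2]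
  | case3 k v ts ih => simp [pdsDistribute2, ih.1, ih.2]; omega

-- main loop invariant: A's fold from a distributed state tracks the tokenizer fold
theorem pds_loop (cs : List Char) :
    ∀ (toks : List (List Char)) (piece : List Char) (d : Int),
      cs.foldl pdsAStep (pdsDistribute2 toks, piece, d, false) =
        (pdsDistribute2 (cs.foldl pdsBStep (toks, piece, d)).1,
         (cs.foldl pdsBStep (toks, piece, d)).2.1,
         (cs.foldl pdsBStep (toks, piece, d)).2.2, false) := by
  induction cs with
  | nil => intro toks piece d; simp
  | cons c cs ih =>
      intro toks piece d
      simp only [List.foldl_cons]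
      by_cases hopen : c = '{' ∨ c = '[' ∨ c = '('
      · have hnc : ¬(c = ')' ∨ c = ']' ∨ c = '}') := by rcases hopen with h|h|h <;> subst h <;> decide
        have hns : ¬(c = ':' ∨ c = ',') := by rcases hopen with h|h|h <;> subst h <;> decide
        have hnq : ¬(c = '"' ∨ c = '\'') := by rcases hopen with h|h|h <;> subst h <;> decide
        rw [show pdsAStep (pdsDistribute2 toks, piece, d, false) c
              = (pdsDistribute2 toks, piece ++ [c], d + 1, false) by
            simp [pdsAStep, hopen, hnc, hns, hnq]]
        rw [show pdsBStep (toks, piece, d) c = (toks, piece ++ [c], d + 1) by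
            simp [pdsBStep, hopen, hns]]
        exact ih toks (piece ++ [c]) (d + 1)
      · by_cases hclose : c = ')' ∨ c = ']' ∨ c = '}'
        · have hns : ¬(c = ':' ∨ c = ',') := by rcases hclose with h|h|h <;> subst h <;> decide
          have hnq : ¬(c = '"' ∨ c = '\'') := by rcases hclose with h|h|h <;> subst h <;> decide
          rw [show pdsAStep (pdsDistribute2 toks, piece, d, false) c
                = (pdsDistribute2 toks, piece ++ [c], d - 1, false) by
              simp [pdsAStep, hopen, hclose, hns, hnq]]
          rw [show pdsBStep (toks, piece, d) c = (toks, piece ++ [c], d - 1) by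
              simp [pdsBStep, hopen, hclose, hns]]
          exact ih toks (piece ++ [c]) (d - 1)
        · by_cases hsep : c = ':' ∨ c = ','
          · have hnq : ¬(c = '"' ∨ c = '\'') := by rcases hsep with h|h <;> subst h <;> decide
            by_cases hd : d > 0
            · rw [show pdsAStep (pdsDistribute2 toks, piece, d, false) c
                    = (pdsDistribute2 toks, piece ++ [c], d, false) by
                  simp [pdsAStep, hopen, hclose, hnq, hsep, hd]]
              rw [show pdsBStep (toks, piece, d) c = (toks, piece ++ [c], d) by
                  simp [pdsBStep, hopen, hclose]; omega]
              exact ih toks (piece ++ [c]) d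
            · have hle : d ≤ 0 := by omega
              have hlen := pdsDistribute2_lengths toks
              rw [show pdsBStep (toks, piece, d) c = (toks ++ [piece], [], d) by
                  simp [pdsBStep, hopen, hclose, hsep, hle]]
              rcases Nat.even_or_odd toks.length with he | ho
              · have h0 : toks.length % 2 = 0 := Nat.even_iff.mp he
                have heq : (pdsDistribute2 toks).1.length = (pdsDistribute2 toks).2.length := by
                  omega
                rw [show pdsAStep (pdsDistribute2 toks, piece, d, false) c
                      = (((pdsDistribute2 toks).1 ++ [String.ofList (PySem.Chars.strip piece)],
                          (pdsDistribute2 toks).2), [], d, false) by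
                    simp [pdsAStep, hopen, hclose, hnq, hsep, heq]; omega]
                rw [show ((pdsDistribute2 toks).1 ++ [String.ofList (PySem.Chars.strip piece)],
                          (pdsDistribute2 toks).2) = pdsDistribute2 (toks ++ [piece]) by
                    rw [pdsDistribute2_append, if_pos h0]]
                exact ih (toks ++ [piece]) [] d
              · have h1 : toks.length % 2 = 1 := Nat.odd_iff.mp ho
                have hne : ¬ (pdsDistribute2 toks).1.length = (pdsDistribute2 toks).2.length := by
                  omega
                rw [show pdsAStep (pdsDistribute2 toks, piece, d, false) c
                      = (((pdsDistribute2 toks).1,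
                          (pdsDistribute2 toks).2 ++ [String.ofList (PySem.Chars.strip piece)]),
                          [], d, false) by
                    simp [pdsAStep, hopen, hclose, hnq, hsep, hne]; omega]
                rw [show ((pdsDistribute2 toks).1,
                          (pdsDistribute2 toks).2 ++ [String.ofList (PySem.Chars.strip piece)])
                        = pdsDistribute2 (toks ++ [piece]) by
                    rw [pdsDistribute2_append, if_neg (by omega)]]
                exact ih (toks ++ [piece]) [] d
          · rw [show pdsAStep (pdsDistribute2 toks, piece, d, false) c
                  = (pdsDistribute2 toks, piece ++ [c], d, false) by
                by_cases hq : c = '"' ∨ c = '\''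
                · simp [pdsAStep, hopen, hclose, hsep, hq]
                · simp [pdsAStep, hopen, hclose, hsep, hq]]
            rw [show pdsBStep (toks, piece, d) c = (toks, piece ++ [c], d) by
                simp [pdsBStep, hopen, hclose, hsep]]
            exact ih toks (piece ++ [c]) d

-- B's zip-over-bounds comprehension computes the recursive segmentation
theorem zip_bounds_eq_segs (cs : List Char) (L : Int) (cuts : List Int) :
    ∀ a : Int,
      ((a :: (cuts ++ [L])).zip (cuts ++ [L])).map
        (fun p => PySem.List.slice cs (some (p.1 + 1)) (some p.2)) =
      pdsSegs cs L a cuts := by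
  induction cuts with
  | nil => intro a; simp [pdsSegs]
  | cons b r ih => intro a; simp only [List.cons_append, List.zip_cons_cons, List.map_cons, pdsSegs, ih b]

-- slices below the old length are unchanged by appending a character
theorem slice_append_stable (p : List Char) (c : Char) (u v : Int)
    (hu : 0 ≤ u) (hv : 0 ≤ v) (hvp : v ≤ (p.length : Int)) :
    PySem.List.slice (p ++ [c]) (some u) (some v) = PySem.List.slice p (some u) (some v) := by
  rw [PySem.List.slice_toNat _ hu hv, PySem.List.slice_toNat _ hu hv]
  by_cases h : u.toNat ≤ p.length
  · rw [List.drop_append_of_le_length h,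
       List.take_append_of_le_length (by simp only [List.length_drop]; omega)]
  · have h1 : p.drop u.toNat = [] := by rw [List.drop_eq_nil_iff]; omega
    have hn : v.toNat - u.toNat = 0 := by omega
    simp [h1, hn]

-- the final slice absorbs an appended character
theorem slice_append_last (p : List Char) (c : Char) (u : Int)
    (hu : 0 ≤ u) (hup : u ≤ (p.length : Int)) :
    PySem.List.slice (p ++ [c]) (some u) (some ((p.length : Int) + 1)) =
      PySem.List.slice p (some u) (some (p.length : Int)) ++ [c] := by
  rw [PySem.List.slice_toNat _ hu (by omega), PySem.List.slice_toNat _ hu (by omega)]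
  rw [List.drop_append_of_le_length (by omega)]
  rw [List.take_of_length_le (by simp only [List.length_append, List.length_drop,
        List.length_cons, List.length_nil]; omega),
      List.take_of_length_le (by simp only [List.length_drop]; omega)]

-- appending a non-separator character keeps pdsSegs in step
theorem pdsSegs_append_nocut (cs : List Char) (c : Char) (cuts : List Int) :
    ∀ a : Int, -1 ≤ a → a < (cs.length : Int) →
      (∀ b ∈ cuts, 0 ≤ b ∧ b < (cs.length : Int)) →
      ∀ (toks : List (List Char)) (piece : List Char),
        pdsSegs cs (cs.length : Int) a cuts = toks ++ [piece] →
        pdsSegs (cs ++ [c]) ((cs.length : Int) + 1) a cuts = toks ++ [piece ++ [c]] := by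
  induction cuts with
  | nil =>
      intro a ha1 ha2 _ toks piece heq
      have hx : toks = [] ∧ piece = PySem.List.slice cs (some (a + 1)) (some (cs.length : Int)) := by
        rcases toks with _ | ⟨t, ts⟩
        · simpa [pdsSegs, eq_comm] using heq
        · exfalso
          have := congrArg List.length heq
          simp [pdsSegs] at this
      rcases hx with ⟨rfl, rfl⟩
      simp only [pdsSegs, List.nil_append]
      rw [slice_append_last cs c (a + 1) (by omega) (by omega)]
  | cons b r ih =>
      intro a ha1 ha2 hb toks piece heq
      have hb0 := hb b (by simp)
      rcases toks with _ | ⟨t, ts⟩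
      · simp only [List.nil_append] at heq
        cases r <;> simp [pdsSegs] at heq
      · simp only [pdsSegs, List.cons_append, List.cons.injEq] at heq ⊢
        refine ⟨?_, ?_⟩
        · rw [slice_append_stable cs c (a + 1) b (by omega) hb0.1 (by omega)]; exact heq.1
        · exact ih b (by omega) (by omega) (fun x hx => hb x (by simp [hx])) ts piece heq.2

-- a new cut at position |cs| closes the current piece and opens an empty one
theorem pdsSegs_append_cut (cs : List Char) (c : Char) (cuts : List Int) :
    ∀ a : Int, -1 ≤ a → a < (cs.length : Int) →
      (∀ b ∈ cuts, 0 ≤ b ∧ b < (cs.length : Int)) →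
      ∀ (toks : List (List Char)) (piece : List Char),
        pdsSegs cs (cs.length : Int) a cuts = toks ++ [piece] →
        pdsSegs (cs ++ [c]) ((cs.length : Int) + 1) a (cuts ++ [(cs.length : Int)]) =
          toks ++ [piece] ++ [[]] := by
  induction cuts with
  | nil =>
      intro a ha1 ha2 _ toks piece heq
      have hx : toks = [] ∧ piece = PySem.List.slice cs (some (a + 1)) (some (cs.length : Int)) := by
        rcases toks with _ | ⟨t, ts⟩
        · simpa [pdsSegs, eq_comm] using heq
        · exfalso
          have := congrArg List.length heq
          simp [pdsSegs] at this
      rcases hx with ⟨rfl, rfl⟩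
      simp only [List.nil_append, pdsSegs]
      rw [slice_append_stable cs c (a + 1) (cs.length : Int) (by omega) (by omega) (by omega)]
      rw [show PySem.List.slice (cs ++ [c]) (some ((cs.length : Int) + 1))
            (some ((cs.length : Int) + 1)) = [] by
          rw [PySem.List.slice_toNat _ (by omega) (by omega)]; simp]
      simp
  | cons b r ih =>
      intro a ha1 ha2 hb toks piece heq
      have hb0 := hb b (by simp)
      rcases toks with _ | ⟨t, ts⟩
      · simp only [List.nil_append] at heq
        cases r <;> simp [pdsSegs] at heq
      · simp only [pdsSegs, List.cons_append, List.cons.injEq] at heq ⊢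
        refine ⟨?_, ?_⟩
        · rw [slice_append_stable cs c (a + 1) b (by omega) hb0.1 (by omega)]; exact heq.1
        · exact ih b (by omega) (by omega) (fun x hx => hb x (by simp [hx])) ts piece heq.2

-- invariant tying B's cut-position fold to the accumulator tokenizer fold
theorem pds_cut_inv (cs : List Char) :
    ((PySem.List.enumerate cs 0).foldl pdsCutStep ([], 0)).2
      = (cs.foldl pdsBStep ([], [], 0)).2.2 ∧
    (∀ b ∈ ((PySem.List.enumerate cs 0).foldl pdsCutStep ([], 0)).1,
        0 ≤ b ∧ b < (cs.length : Int)) ∧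
    pdsSegs cs (cs.length : Int) (-1) ((PySem.List.enumerate cs 0).foldl pdsCutStep ([], 0)).1
      = (cs.foldl pdsBStep ([], [], 0)).1 ++ [(cs.foldl pdsBStep ([], [], 0)).2.1] := by
  induction cs using List.reverseRecOn with
  | nil => simp [pdsSegs, PySem.List.enumerate_nil, PySem.List.slice]
  | append_singleton p c ih =>
      obtain ⟨ihd, ihb, ihs⟩ := ih
      rw [pds_enumerate_append_singleton]
      rw [List.foldl_append, List.foldl_append]
      simp only [List.foldl_cons, List.foldl_nil, zero_add, List.length_append,
        List.length_cons, List.length_nil, Nat.cast_add, Nat.cast_one]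
      set S := (PySem.List.enumerate p 0).foldl pdsCutStep ([], 0) with hS
      set T := p.foldl pdsBStep ([], [], 0) with hT
      by_cases hopen : c = '{' ∨ c = '[' ∨ c = '('
      · have hnc : ¬(c = ')' ∨ c = ']' ∨ c = '}') := by rcases hopen with h|h|h <;> subst h <;> decide
        have hns : ¬(c = ':' ∨ c = ',') := by rcases hopen with h|h|h <;> subst h <;> decide
        rw [show pdsCutStep S ((p.length : Int), c) = (S.1, S.2 + 1) by
            simp [pdsCutStep, hopen, hnc, hns]]
        rw [show pdsBStep T c = (T.1, T.2.1 ++ [c], T.2.2 + 1) by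
            simp [pdsBStep, hopen, hns]]
        refine ⟨by simp [ihd], fun b hbm => by have := ihb b hbm; constructor <;> omega, ?_⟩
        exact pdsSegs_append_nocut p c S.1 (-1) (by omega) (by omega) ihb T.1 T.2.1 ihs
      · by_cases hclose : c = ')' ∨ c = ']' ∨ c = '}'
        · have hns : ¬(c = ':' ∨ c = ',') := by rcases hclose with h|h|h <;> subst h <;> decide
          rw [show pdsCutStep S ((p.length : Int), c) = (S.1, S.2 - 1) by
              simp [pdsCutStep, hopen, hclose, hns]]
          rw [show pdsBStep T c = (T.1, T.2.1 ++ [c], T.2.2 - 1) by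
              simp [pdsBStep, hopen, hclose, hns]]
          refine ⟨by simp [ihd], fun b hbm => by have := ihb b hbm; constructor <;> omega, ?_⟩
          exact pdsSegs_append_nocut p c S.1 (-1) (by omega) (by omega) ihb T.1 T.2.1 ihs
        · by_cases hsep : c = ':' ∨ c = ','
          · by_cases hd : T.2.2 ≤ 0
            · rw [show pdsCutStep S ((p.length : Int), c) = (S.1 ++ [(p.length : Int)], T.2.2) by
                  simp [pdsCutStep, hopen, hclose, hsep, ihd, hd]]
              rw [show pdsBStep T c = (T.1 ++ [T.2.1], [], T.2.2) by
                  simp [pdsBStep, hopen, hclose, hsep, hd]]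
              refine ⟨rfl, ?_, ?_⟩
              · intro b hbm
                simp only [List.mem_append, List.mem_singleton] at hbm
                rcases hbm with hbm | rfl
                · have := ihb b hbm; constructor <;> omega
                · constructor <;> omega
              · exact pdsSegs_append_cut p c S.1 (-1) (by omega) (by omega) ihb T.1 T.2.1 ihs
            · rw [show pdsCutStep S ((p.length : Int), c) = (S.1, T.2.2) by
                  simp [pdsCutStep, hopen, hclose, hsep, ihd, hd]]
              rw [show pdsBStep T c = (T.1, T.2.1 ++ [c], T.2.2) by
                  simp [pdsBStep, hopen, hclose, hsep, hd]]
              refine ⟨rfl, fun b hbm => by have := ihb b hbm; constructor <;> omega, ?_⟩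
              exact pdsSegs_append_nocut p c S.1 (-1) (by omega) (by omega) ihb T.1 T.2.1 ihs
          · rw [show pdsCutStep S ((p.length : Int), c) = (S.1, T.2.2) by
                simp [pdsCutStep, hopen, hclose, hsep, ihd]]
            rw [show pdsBStep T c = (T.1, T.2.1 ++ [c], T.2.2) by
                simp [pdsBStep, hopen, hclose, hsep]]
            refine ⟨rfl, fun b hbm => by have := ihb b hbm; constructor <;> omega, ?_⟩
            exact pdsSegs_append_nocut p c S.1 (-1) (by omega) (by omega) ihb T.1 T.2.1 ihs

-- ===== VERDICT (by name: the statement is the Claim_ definition above) =====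
theorem parseDictString_spec : Claim_equal_parseDictString := by
  intro item _
  unfold Spec_parseDictString parseDictString parseDictString_alt
  set content := PySem.List.slice item.toList
    (some (PySem.Str.find item "{" + 1)) (some (PySem.Str.rfind item "}")) with hc
  obtain ⟨hd, hb, hs⟩ := pds_cut_inv content
  have hz := zip_bounds_eq_segs content (content.length : Int)
    ((PySem.List.enumerate content 0).foldl pdsCutStep ([], 0)).1 (-1)
  have hloop := pds_loop content [] [] 0
  simp only [show pdsDistribute2 [] = ([], []) by rfl] at hloop
  dsimp only
  simp only [List.tail_cons]
  rw [hloop, hz, hs]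
  rw [PySem.List.slice_to_neg_one, List.dropLast_concat,
      PySem.List.pyGetD_neg_one_append_singleton]
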